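-- pv_equiv track=rewrite | github.com/karin0/problems | probs/bzoj2656.py | f
-- ===== SOURCE A (Python) =====
-- db = {0: 0, 1: 1}
--
-- def f(x):
--     if x <= 1:
--         return x
--     if x in db:
--         return db[x]
--     h = x >> 1
--     if x & 1:
--         y = f(h) + f(h + 1)
--     else:
--         y = f(h)
--     db[x] = y
--     return y
-- ===== SOURCE B (Python) =====
-- def f(x):
--     if x <= 1:
--         return x
--     a, b = 1, 0
--     while x > 0:
--         if x & 1:
--             b += a
--         else:
--             a += b
--         x >>= 1
--     return b
-- ===== Notes on version B (the rewrite author's own statement) =====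
-- stated objective: simpler
-- what changed: Replaces the memoized top-down recursion on f(x>>1) and f((x>>1)+1) with an iterative bottom-up scan of x's bits maintaining two accumulators (the standard fusc/Stern-sequence iteration): no recursion, no global cache (B does not populate the module-level db dict).
import Mathlib
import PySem

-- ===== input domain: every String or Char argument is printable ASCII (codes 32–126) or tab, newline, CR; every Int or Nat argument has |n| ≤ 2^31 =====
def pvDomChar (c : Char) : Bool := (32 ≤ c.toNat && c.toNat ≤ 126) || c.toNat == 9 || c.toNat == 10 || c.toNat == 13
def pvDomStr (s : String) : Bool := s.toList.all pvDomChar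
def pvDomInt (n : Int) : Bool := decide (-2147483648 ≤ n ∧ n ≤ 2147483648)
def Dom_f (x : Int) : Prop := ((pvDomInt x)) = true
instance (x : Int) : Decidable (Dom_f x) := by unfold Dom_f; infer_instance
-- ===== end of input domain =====

-- B replaces A's memoized recursion by the iterative two-accumulator bit scan of the fusc
-- sequence (simpler: no recursion, no cache); A also mutates the global dict `db`, B does not —
-- the equivalence proved here is about the return value only.

-- ===== PORT A =====
-- A's recursion reads and writes the module-level memo dict `db`; the port threads that dict
-- through the recursion as explicit state, starting from the literal {0: 0, 1: 1}.
theorem pvShiftLt (x : Int) (hx : 0 < x) : (x >>> (1:Nat)).toNat < x.toNat := by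
  have h : x >>> (1:Nat) = x / 2 := by
    rcases x with n | n
    · simp [Int.shiftRight_eq_div_pow]
    · omega
  omega

theorem pvShiftSuccLt (x : Int) (hx : ¬ x ≤ 1) (ho : PySem.Int.band x 1 = 1) :
    (x >>> (1:Nat) + 1).toNat < x.toNat := by
  have h : x >>> (1:Nat) = x / 2 := by
    rcases x with n | n
    · simp [Int.shiftRight_eq_div_pow]
    · omega
  have hm : PySem.Int.mod x 2 = 1 := by rw [← PySem.Int.band_one]; exact ho
  have hm' : x % 2 = 1 := by rw [← PySem.Int.mod_eq_emod_of_pos (by omega : (0:Int) < 2)]; exact hm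
  omega

def f_memo (db : PySem.Dict Int Int) (x : Int) : PySem.Dict Int Int × Int :=
  if hx : x ≤ 1 then (db, x)
  else
    match db.get? x with
    | some v => (db, v)
    | none =>
      let h := x >>> (1:Nat)
      if ho : PySem.Int.band x 1 = 1 then
        let r1 := f_memo db h
        let r2 := f_memo r1.1 (h + 1)
        let y := r1.2 + r2.2
        (r2.1.insert x y, y)
      else
        let r1 := f_memo db h
        (r1.1.insert x r1.2, r1.2)
termination_by x.toNat
decreasing_by
  · exact pvShiftLt x (by omega)
  · exact pvShiftSuccLt x hx ho
  · exact pvShiftLt x (by omega)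

def f (x : Int) : Int :=
  (f_memo ((PySem.Dict.empty.insert (0:Int) (0:Int)).insert 1 1) x).2

-- ===== PORT B =====
def fuscLoop (a b x : Int) : Int :=
  if hx : x > 0 then
    if PySem.Int.band x 1 = 1 then fuscLoop a (b + a) (x >>> (1:Nat))
    else fuscLoop (a + b) b (x >>> (1:Nat))
  else b
termination_by x.toNat
decreasing_by
  · exact pvShiftLt x hx
  · exact pvShiftLt x hx

def f_alt (x : Int) : Int :=
  if x ≤ 1 then x else fuscLoop 1 0 x

-- ===== PRECONDITION & SPEC =====
def Spec_f (x : Int) (out : Int) : Prop := out = f_alt x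
instance (x : Int) (out : Int) : Decidable (Spec_f x out) := by unfold Spec_f; infer_instance

-- ===== CLAIM (what is proved, stated in full; the proofs are below) =====
def Claim_equal_f : Prop := ∀ (x : Int), Dom_f x → Spec_f x (f x)

-- ===== LEMMAS AND PROOFS =====

-- the pure fusc value both programs compute
def g (x : Int) : Int :=
  if x ≤ 1 then x
  else if x % 2 = 1 then g (x / 2) + g (x / 2 + 1) else g (x / 2)
termination_by x.toNat
decreasing_by all_goals omega

theorem shift_one (x : Int) (h : 0 ≤ x) : x >>> (1:Nat) = x / 2 := by
  rcases x with n | n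
  · simp [Int.shiftRight_eq_div_pow]
  · omega

theorem band_one_iff (x : Int) (hx : 0 < x) : PySem.Int.band x 1 = 1 ↔ x % 2 = 1 := by
  rw [PySem.Int.band_one, PySem.Int.mod_eq_emod_of_pos (by omega : (0:Int) < 2)]

theorem g_nonpos (x : Int) (h : x ≤ 1) : g x = x := by rw [g]; simp [h]

theorem g_zero : g 0 = 0 := g_nonpos 0 (by omega)
theorem g_one : g 1 = 1 := g_nonpos 1 (by omega)

theorem g_odd (x : Int) (hx : 0 < x) (ho : x % 2 = 1) :
    g x = g (x / 2) + g (x / 2 + 1) := by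
  by_cases h1 : x = 1
  · subst h1
    rw [show (1:Int)/2 = 0 by omega]
    norm_num [g_zero, g_one]
  · rw [g]; simp [show ¬ x ≤ 1 by omega, ho]

theorem g_odd_succ (x : Int) (hx : 0 < x) (ho : x % 2 = 1) :
    g (x + 1) = g (x / 2 + 1) := by
  rw [g]
  have h1 : ¬ x + 1 ≤ 1 := by omega
  have h2 : ¬ (x + 1) % 2 = 1 := by omega
  have h3 : (x + 1) / 2 = x / 2 + 1 := by omega
  simp [h1, h2, h3]

theorem g_even (x : Int) (hx : 0 < x) (he : x % 2 = 0) : g x = g (x / 2) := by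
  rw [g]
  simp [show ¬ x ≤ 1 by omega, show ¬ x % 2 = 1 by omega]

theorem g_even_succ (x : Int) (hx : 0 < x) (he : x % 2 = 0) :
    g (x + 1) = g (x / 2) + g (x / 2 + 1) := by
  rw [g]
  have h1 : ¬ x + 1 ≤ 1 := by omega
  have h2 : (x + 1) % 2 = 1 := by omega
  have h3 : (x + 1) / 2 = x / 2 := by omega
  simp [h1, h2, h3]

-- loop invariant for B
theorem fuscLoop_eq (n : Nat) : ∀ (a b x : Int), x.toNat = n → 0 ≤ x →
    fuscLoop a b x = a * g x + b * g (x + 1) := by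
  induction n using Nat.strong_induction_on with
  | _ n ih =>
    intro a b x hn hx
    rw [fuscLoop]
    by_cases hpos : x > 0
    · have hs : x >>> (1:Nat) = x / 2 := shift_one x hx
      by_cases ho : x % 2 = 1
      · rw [dif_pos hpos, if_pos ((band_one_iff x hpos).mpr ho), hs,
          ih (x/2).toNat (by omega) a (b + a) (x/2) rfl (by omega),
          g_odd x hpos ho, g_odd_succ x hpos ho]
        ring
      · have he : x % 2 = 0 := by omega
        rw [dif_pos hpos, if_neg (fun h => ho ((band_one_iff x hpos).mp h)), hs,
          ih (x/2).toNat (by omega) (a + b) b (x/2) rfl (by omega),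
          g_even x hpos he, g_even_succ x hpos he]
        ring
    · have hx0 : x = 0 := by omega
      rw [dif_neg hpos, hx0, g_zero, show (0:Int)+1 = 1 by omega, g_one]
      ring

-- the memo dict only ever holds correct values
def Good (db : PySem.Dict Int Int) : Prop :=
  ∀ k v, db.get? k = some v → v = g k

theorem good_insert (db : PySem.Dict Int Int) (x y : Int) (hdb : Good db)
    (hy : y = g x) : Good (db.insert x y) := by
  intro k v hk
  rw [PySem.Dict.get?_insert] at hk
  by_cases h : k = x
  · subst h; simp at hk; omega
  · exact hdb k v (by simpa [h] using hk)

theorem f_memo_eq (n : Nat) : ∀ (db : PySem.Dict Int Int) (x : Int), x.toNat = n →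
    Good db → (f_memo db x).2 = g x ∧ Good (f_memo db x).1 := by
  induction n using Nat.strong_induction_on with
  | _ n ih =>
    intro db x hn hdb
    subst hn
    rw [f_memo]
    by_cases hx : x ≤ 1
    · simp only [dif_pos hx]
      exact ⟨(g_nonpos x hx).symm, hdb⟩
    · simp only [dif_neg hx]
      cases hget : db.get? x with
      | some v => exact ⟨hdb x v hget, hdb⟩
      | none =>
        have hs : x >>> (1:Nat) = x / 2 := shift_one x (by omega)
        by_cases ho : PySem.Int.band x 1 = 1
        · have hom : x % 2 = 1 := (band_one_iff x (by omega)).mp ho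
          simp only [dif_pos ho]
          obtain ⟨h1, hG1⟩ := ih (x >>> (1:Nat)).toNat (by exact pvShiftLt x (by omega))
            db (x >>> (1:Nat)) rfl hdb
          obtain ⟨h2, hG2⟩ := ih (x >>> (1:Nat) + 1).toNat (by exact pvShiftSuccLt x hx ho)
            (f_memo db (x >>> (1:Nat))).1 (x >>> (1:Nat) + 1) rfl hG1
          have hy : (f_memo db (x >>> (1:Nat))).2 +
              (f_memo (f_memo db (x >>> (1:Nat))).1 (x >>> (1:Nat) + 1)).2 = g x := by
            rw [h1, h2, hs, g_odd x (by omega) hom]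
          exact ⟨hy, good_insert _ x _ hG2 hy⟩
        · have hem : x % 2 = 0 := by
            have := (band_one_iff x (by omega)).not.mp ho; omega
          simp only [dif_neg ho]
          obtain ⟨h1, hG1⟩ := ih (x >>> (1:Nat)).toNat (by exact pvShiftLt x (by omega))
            db (x >>> (1:Nat)) rfl hdb
          have hy : (f_memo db (x >>> (1:Nat))).2 = g x := by
            rw [h1, hs, g_even x (by omega) hem]
          exact ⟨hy, good_insert _ x _ hG1 hy⟩

theorem good_init : Good ((PySem.Dict.empty.insert (0:Int) (0:Int)).insert 1 1) := by
  intro k v hk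
  rw [PySem.Dict.get?_insert] at hk
  by_cases h1 : k = 1
  · subst h1; simp at hk; rw [g_one]; omega
  · rw [if_neg h1, PySem.Dict.get?_insert] at hk
    by_cases h0 : k = 0
    · subst h0; simp at hk; rw [g_zero]; omega
    · rw [if_neg h0] at hk; simp [PySem.Dict.get?_empty] at hk

-- ===== VERDICT (by name: the statement is the Claim_ definition above) =====
theorem f_spec : Claim_equal_f := by
  intro x _
  unfold Spec_f f f_alt
  by_cases hx : x ≤ 1
  · rw [if_pos hx, f_memo, dif_pos hx]
  · rw [if_neg hx,
      (f_memo_eq x.toNat _ x rfl good_init).1,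
      fuscLoop_eq x.toNat 1 0 x rfl (by omega)]
    ring
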